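-- pv_equiv track=rewrite | github.com/oruanaidh-ai/wayback_machine | PYTHON/utils/tools/dsp/findpeaks.py | findpeaks_naive
-- ===== SOURCE A (Python) =====
-- def findpeaks_naive(f, W=100):
--     """
--     Iterator to find the peaks in a set of data points.
--
--     The algorithm is dumb. It checks to see if each element is greater
--     than the W values to the left and W values to the right.
--
--     Args:
--         f: the data
--         W: (optional) The half-width of the window. A
--         peak must be greater than W elements to its left and W
--         elements to its right.
--
--     Returns:
--         the peaks of the data, one at a time (streaming)
--
--     Raises:
--         StopIteration.
--     """
--
--     N = len(f)
--
--     for i in range(W, N-W):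
--         foundPeak = True
--         current = f[i]
--
--         for j in range(i-W, i+W+1):
--             if current < f[j]:
--                 foundPeak = False
--                 break
--
--         if foundPeak:
--             yield i
-- ===== SOURCE B (Python) =====
-- def findpeaks_naive(f, W=100):
--     """Sliding-window maximum via a monotonic deque, in a single pass.
--
--     Yields each index i in [W, N-W) whose value equals the maximum of the
--     window f[i-W : i+W+1], i.e. is >= everything within W on either side.
--     """
--     N = len(f)
--     dq = []      # indices with strictly decreasing values; dq[head:] is live
--     head = 0
--     for r in range(N):
--         v = f[r]
--         while len(dq) > head and f[dq[-1]] <= v: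
--             dq.pop()
--         dq.append(r)
--         i = r - W            # the window [i-W, i+W] is complete once r = i+W
--         if i >= W:
--             while dq[head] < i - W:
--                 head += 1
--             if f[dq[head]] == f[i]:
--                 yield i
-- ===== Notes on version B (the rewrite author's own statement) =====
-- stated objective: alternative
-- what changed: Replaced the per-index rescan of the full +/-W window by a single pass maintaining a monotonic deque of candidate maxima, yielding i when f[i] equals the window maximum at the deque front.
import Mathlib
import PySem

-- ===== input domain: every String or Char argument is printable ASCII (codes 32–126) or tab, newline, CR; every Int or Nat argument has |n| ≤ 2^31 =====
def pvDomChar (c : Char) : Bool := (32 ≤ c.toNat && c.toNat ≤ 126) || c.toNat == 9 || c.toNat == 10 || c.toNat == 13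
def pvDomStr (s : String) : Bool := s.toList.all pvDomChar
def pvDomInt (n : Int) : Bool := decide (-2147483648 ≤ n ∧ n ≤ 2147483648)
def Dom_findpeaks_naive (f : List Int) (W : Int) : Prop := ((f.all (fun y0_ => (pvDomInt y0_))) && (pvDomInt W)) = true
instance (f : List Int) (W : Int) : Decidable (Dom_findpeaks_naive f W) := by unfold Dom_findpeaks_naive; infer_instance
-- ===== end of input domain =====

-- ===== PORT A =====
-- B replaces A's per-index rescan of the +/-W window by a single-pass monotonic-deque
-- sliding-window maximum (equality of RETURN values; both Pythons are generators,
-- compared as the list of yielded indices).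
def findpeaks_naive (f : List Int) (W : Int) : List Int :=
  let N : Int := PySem.List.len f
  (PySem.List.pyRange W (N - W) 1).foldl (fun acc i =>
    let current := PySem.List.pyGetD f i 0
    -- inner for-loop with break: foundPeak = no j in the window with current < f[j]
    let foundPeak := (PySem.List.pyRange (i - W) (i + W + 1) 1).all
        (fun j => decide (PySem.List.pyGetD f j 0 ≤ current))
    if foundPeak then acc ++ [i] else acc) []

-- ===== PORT B =====
-- while len(dq) > head and f[dq[-1]] <= v: dq.pop()
-- (structural fuel recursion; fuel = len(dq) bounds the number of pops exactly)
def bPopAux (f : List Int) (v : Int) (head : Nat) : Nat → List Int → List Int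
  | 0, dq => dq
  | fuel + 1, dq =>
    if head < dq.length ∧ PySem.List.pyGetD f (dq.getLastD 0) 0 ≤ v then
      bPopAux f v head fuel dq.dropLast
    else dq

def bPop (f : List Int) (v : Int) (dq : List Int) (head : Nat) : List Int :=
  bPopAux f v head dq.length dq

-- while dq[head] < bound: head += 1   (fuel = len(dq) - head; on Pre_ the Python
-- loop stops before head reaches len(dq), so the fuel bound is never the reason to stop)
def bAdvanceAux (dq : List Int) (bound : Int) : Nat → Nat → Nat
  | 0, head => head
  | fuel + 1, head =>
    if head < dq.length ∧ dq.getD head 0 < bound then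
      bAdvanceAux dq bound fuel (head + 1)
    else head

def bAdvance (dq : List Int) (head : Nat) (bound : Int) : Nat :=
  bAdvanceAux dq bound (dq.length - head) head

def findpeaks_naive_alt (f : List Int) (W : Int) : List Int :=
  let N : Int := PySem.List.len f
  let st := (PySem.List.pyRange 0 N 1).foldl
    (fun (st : List Int × Nat × List Int) r =>
      let dq := st.1
      let head := st.2.1
      let out := st.2.2
      let v := PySem.List.pyGetD f r 0
      let dq := bPop f v dq head
      let dq := dq ++ [r]
      let i := r - W
      if W ≤ i then
        let head := bAdvance dq head (i - W)
        if PySem.List.pyGetD f (dq.getD head 0) 0 = PySem.List.pyGetD f i 0 then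
          (dq, head, out ++ [i])
        else (dq, head, out)
      else (dq, head, out)) ([], 0, [])
  st.2.2

-- ===== PRECONDITION & SPEC =====
-- For W < 0 the Python A always raises IndexError (range(W, N-W) is nonempty and
-- reaches an index i with i >= N or i < -N in f[i]); exactly those inputs are excluded.
def Pre_findpeaks_naive (f : List Int) (W : Int) : Prop := 0 ≤ W
instance (f : List Int) (W : Int) : Decidable (Pre_findpeaks_naive f W) := by
  unfold Pre_findpeaks_naive; infer_instance
def pvWitness_findpeaks_naive : List Int × Int := ([0, 2, 1, 2, 0], 1)

def Spec_findpeaks_naive (f : List Int) (W : Int) (out : List Int) : Prop := out = findpeaks_naive_alt f W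
instance (f : List Int) (W : Int) (out : List Int) : Decidable (Spec_findpeaks_naive f W out) := by unfold Spec_findpeaks_naive; infer_instance

-- ===== CLAIM (what is proved, stated in full; the proofs are below) =====
def Claim_equal_findpeaks_naive : Prop := ∀ (f : List Int) (W : Int), Dom_findpeaks_naive f W → Pre_findpeaks_naive f W → Spec_findpeaks_naive f W (findpeaks_naive f W)

-- ===== LEMMAS AND PROOFS =====

-- value function
def pkG (f : List Int) (j : Nat) : Int := f.getD j 0

-- candidate list: indices j ≤ r strictly greater than everything after them up to r
def pkCand (g : Nat → Int) (r : Nat) : List Nat :=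
  (List.range (r+1)).filter (fun j => decide (∀ k ≤ r, j < k → g k < g j))

theorem pkCand_mem (g : Nat → Int) (r j : Nat) :
    j ∈ pkCand g r ↔ j ≤ r ∧ ∀ k ≤ r, j < k → g k < g j := by
  simp [pkCand, List.mem_filter, List.mem_range, Nat.lt_succ_iff]

theorem pkCand_sorted (g : Nat → Int) (r : Nat) : (pkCand g r).Pairwise (· < ·) :=
  List.Pairwise.sublist List.filter_sublist List.pairwise_lt_range

theorem pkCand_self (g : Nat → Int) (r : Nat) : r ∈ pkCand g r := by
  rw [pkCand_mem]; exact ⟨le_refl r, fun k hk hk' => absurd (lt_of_lt_of_le hk' hk) (lt_irrefl r)⟩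

theorem pkCand_vals (g : Nat → Int) (r : Nat) {a b : Nat} (ha : a ∈ pkCand g r)
    (hb : b ∈ pkCand g r) (hab : a < b) : g b < g a := by
  rw [pkCand_mem] at ha hb
  exact ha.2 b hb.1 hab

theorem pkCand_rec (g : Nat → Int) (r : Nat) :
    pkCand g (r+1) = (pkCand g r).filter (fun j => decide (g (r+1) < g j)) ++ [r+1] := by
  unfold pkCand
  rw [List.range_succ (n := r+1), List.filter_append, List.filter_filter]
  congr 1
  · apply List.filter_congr
    intro j hj
    simp only [List.mem_range, Nat.lt_succ_iff] at hj
    rw [← Bool.decide_and, decide_eq_decide]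
    constructor
    · intro h
      exact ⟨h (r+1) (le_refl _) (by omega), fun k hk hk' => h k (by omega) hk'⟩
    · rintro ⟨h1, h2⟩ k hk hk'
      rcases Nat.lt_succ_iff_lt_or_eq.mp (Nat.lt_succ_of_le hk) with h | h
      · exact h2 k (by omega) hk'
      · subst h; exact h1
  · rw [List.filter_eq_self]
    intro a ha
    simp only [List.mem_singleton] at ha
    subst ha
    simp only [decide_eq_true_eq]
    omega


-- last argmax of g on [lo, r]
theorem pk_exists_argmax (g : Nat → Int) (lo r : Nat) (h : lo ≤ r) :
    ∃ j, lo ≤ j ∧ j ≤ r ∧ (∀ k, lo ≤ k → k ≤ r → g k ≤ g j) ∧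
      (∀ k, j < k → k ≤ r → g k < g j) := by
  induction r, h using Nat.le_induction with
  | base =>
    refine ⟨lo, le_refl _, le_refl _, ?_, ?_⟩
    · intro k hk hk'
      have : k = lo := by omega
      rw [this]
    · intro k hk hk'; omega
  | succ r hr ih =>
    obtain ⟨j, hj1, hj2, hmax, hstrict⟩ := ih
    by_cases hc : g j ≤ g (r+1)
    · refine ⟨r+1, by omega, le_refl _, ?_, ?_⟩
      · intro k hk hk'
        rcases Nat.lt_succ_iff_lt_or_eq.mp (Nat.lt_succ_of_le hk') with hlt | heq
        · exact le_trans (hmax k hk (by omega)) hc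
        · rw [heq]
      · intro k hk hk'; omega
    · refine ⟨j, hj1, by omega, ?_, ?_⟩
      · intro k hk hk'
        rcases Nat.lt_succ_iff_lt_or_eq.mp (Nat.lt_succ_of_le hk') with hlt | heq
        · exact hmax k hk (by omega)
        · rw [heq]; omega
      · intro k hk hk'
        rcases Nat.lt_succ_iff_lt_or_eq.mp (Nat.lt_succ_of_le hk') with hlt | heq
        · exact hstrict k hk (by omega)
        · rw [heq]; omega

-- the head of the window-restricted candidate list is the window maximum
theorem pk_head_max (g : Nat → Int) (r lo : Nat) (hlo : lo ≤ r) (c : Nat) (rest : List Nat)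
    (hc : (pkCand g r).filter (fun j => decide (lo ≤ j)) = c :: rest) :
    lo ≤ c ∧ c ≤ r ∧ ∀ k, lo ≤ k → k ≤ r → g k ≤ g c := by
  have hcmem : c ∈ (pkCand g r).filter (fun j => decide (lo ≤ j)) := by rw [hc]; exact List.mem_cons_self
  have hcand : c ∈ pkCand g r := (List.mem_filter.mp hcmem).1
  have hclo : lo ≤ c := by have := (List.mem_filter.mp hcmem).2; simpa using this
  have hcr : c ≤ r := ((pkCand_mem g r c).mp hcand).1
  obtain ⟨j, hj1, hj2, hmax, hstrict⟩ := pk_exists_argmax g lo r hlo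
  have hjmem : j ∈ (pkCand g r).filter (fun j => decide (lo ≤ j)) := by
    rw [List.mem_filter]
    refine ⟨(pkCand_mem g r j).mpr ⟨hj2, fun k hk hk' => hstrict k hk' hk⟩, by simpa using hj1⟩
  have hsorted : ((pkCand g r).filter (fun j => decide (lo ≤ j))).Pairwise (· < ·) :=
    List.Pairwise.sublist List.filter_sublist (pkCand_sorted g r)
  have hcj : c ≤ j := by
    rw [hc] at hjmem hsorted
    rcases List.mem_cons.mp hjmem with h | h
    · omega
    · exact le_of_lt ((List.pairwise_cons.mp hsorted).1 j h)
  have hceq : g c = g j := by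
    rcases Nat.lt_or_ge c j with hlt | hge
    · have h1 : g j < g c := pkCand_vals g r hcand ((List.mem_filter.mp hjmem).1) hlt
      have h2 : g c ≤ g j := hmax c hclo hcr
      omega
    · have : c = j := by omega
      rw [this]
  exact ⟨hclo, hcr, fun k hk hk' => hceq ▸ hmax k hk hk'⟩

theorem bPopAux_spec (f : List Int) (v : Int) (pre suf : List Nat)
    (hdec : suf.Pairwise (fun a b => f.getD b 0 < f.getD a 0)) :
    bPopAux f v pre.length (pre.length + suf.length) ((pre ++ suf).map (Nat.cast : Nat → Int)) =
      (pre ++ suf.filter (fun j => decide (v < f.getD j 0))).map (Nat.cast : Nat → Int) := by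
  induction suf using List.reverseRecOn with
  | nil =>
    simp only [List.append_nil, List.length_nil, Nat.add_zero, List.filter_nil]
    cases hl : pre.length with
    | zero => rfl
    | succ m =>
      unfold bPopAux
      rw [if_neg (fun hcon => absurd hcon.1 (by simp [hl]))]
  | append_singleton s a ih =>
    have hpair := List.pairwise_append.mp hdec
    have hlast : ((pre ++ (s ++ [a])).map (Nat.cast : Nat → Int)).getLastD 0 = (a : Int) := by
      rw [← List.append_assoc, List.map_append]
      simp
    simp only [List.length_append, List.length_singleton]
    rw [show pre.length + (s.length + 1) = (pre.length + s.length) + 1 by omega]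
    unfold bPopAux
    by_cases hc : f.getD a 0 ≤ v
    · have hcond : pre.length < ((pre ++ (s ++ [a])).map (Nat.cast : Nat → Int)).length ∧
          PySem.List.pyGetD f (((pre ++ (s ++ [a])).map (Nat.cast : Nat → Int)).getLastD 0) 0 ≤ v := by
        constructor
        · simp only [List.length_map, List.length_append, List.length_singleton]; omega
        · rw [hlast, PySem.List.pyGetD_natCast]; exact hc
      rw [if_pos hcond]
      rw [show ((pre ++ (s ++ [a])).map (Nat.cast : Nat → Int)).dropLast
            = (pre ++ s).map (Nat.cast : Nat → Int) by
          rw [← List.append_assoc, List.map_append (l₂ := [a])]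
          simp]
      rw [ih hpair.1, List.filter_append, List.filter_singleton]
      rw [show (decide (v < f.getD a 0)) = false from by simp only [decide_eq_false_iff_not]; omega]
      simp only [Bool.cond_false, List.append_nil]
    · have hncond : ¬ (pre.length < ((pre ++ (s ++ [a])).map (Nat.cast : Nat → Int)).length ∧
          PySem.List.pyGetD f (((pre ++ (s ++ [a])).map (Nat.cast : Nat → Int)).getLastD 0) 0 ≤ v) := by
        intro hcon
        rw [hlast, PySem.List.pyGetD_natCast] at hcon
        exact hc hcon.2
      rw [if_neg hncond]
      have hall : ∀ x ∈ s ++ [a], (decide (v < f.getD x 0)) = true := by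
        intro x hx
        simp only [decide_eq_true_eq]
        rcases List.mem_append.mp hx with h | h
        · have := hpair.2.2 x h a (List.mem_singleton_self a)
          omega
        · simp only [List.mem_singleton] at h
          subst h
          omega
      rw [List.filter_eq_self.mpr hall]

theorem bPop_spec (f : List Int) (v : Int) (pre suf : List Nat)
    (hdec : suf.Pairwise (fun a b => f.getD b 0 < f.getD a 0)) :
    bPop f v ((pre ++ suf).map (Nat.cast : Nat → Int)) pre.length =
      (pre ++ suf.filter (fun j => decide (v < f.getD j 0))).map (Nat.cast : Nat → Int) := by
  unfold bPop
  rw [show ((pre ++ suf).map (Nat.cast : Nat → Int)).length = pre.length + suf.length by simp]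
  exact bPopAux_spec f v pre suf hdec

theorem bAdvanceAux_spec (pre suf : List Nat) (bound : Int) :
    bAdvanceAux ((pre ++ suf).map (Nat.cast : Nat → Int)) bound suf.length pre.length =
      pre.length + (suf.takeWhile (fun j : Nat => decide ((j : Int) < bound))).length := by
  induction suf generalizing pre with
  | nil => rfl
  | cons a s ih =>
    show bAdvanceAux _ bound (s.length + 1) _ = _
    unfold bAdvanceAux
    have hget : ((pre ++ a :: s).map (Nat.cast : Nat → Int)).getD pre.length 0 = (a : Int) := by
      rw [List.map_append]
      rw [List.getD_eq_getElem?_getD, List.getElem?_append_right (by simp)]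
      simp
    by_cases hc : (a : Int) < bound
    · rw [if_pos ⟨by simp only [List.length_map, List.length_append, List.length_cons]; omega,
          by rw [hget]; exact hc⟩]
      have h1 : pre ++ a :: s = (pre ++ [a]) ++ s := by simp
      have h2 : pre.length + 1 = (pre ++ [a]).length := by simp
      rw [h1, h2, ih]
      rw [List.takeWhile_cons_of_pos (by simpa using hc)]
      simp only [List.length_append, List.length_singleton, List.length_cons, List.length_nil]
      omega
    · rw [if_neg (fun hcon => hc (hget ▸ hcon.2))]
      rw [List.takeWhile_cons_of_neg (by simpa using hc)]
      simp

theorem bAdvance_spec (pre suf : List Nat) (bound : Int) :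
    bAdvance ((pre ++ suf).map (Nat.cast : Nat → Int)) pre.length bound =
      pre.length + (suf.takeWhile (fun j : Nat => decide ((j : Int) < bound))).length := by
  unfold bAdvance
  rw [show ((pre ++ suf).map (Nat.cast : Nat → Int)).length - pre.length = suf.length by simp]
  exact bAdvanceAux_spec pre suf bound

theorem sorted_dropWhile_filter (suf : List Nat) (bound : Int) (hs : suf.Pairwise (· < ·)) :
    suf.dropWhile (fun j : Nat => decide ((j : Int) < bound)) =
      suf.filter (fun j : Nat => decide (bound ≤ (j : Int))) := by
  induction suf with
  | nil => rfl
  | cons a s ih =>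
    rcases List.pairwise_cons.mp hs with ⟨ha, hs'⟩
    by_cases hc : (a : Int) < bound
    · rw [List.dropWhile_cons_of_pos (by simpa using hc), ih hs']
      rw [List.filter_cons_of_neg (by simp; omega)]
    · rw [List.dropWhile_cons_of_neg (by simpa using hc)]
      rw [List.filter_cons_of_pos (by simp; omega)]
      rw [List.filter_eq_self.mpr]
      intro x hx
      have := ha x hx
      simp only [decide_eq_true_eq]
      have : (a : Int) ≤ (x : Int) := by exact_mod_cast Nat.le_of_lt (ha x hx)
      omega

-- window-condition spec: rr is ≥ everything within w on either side
def pkOut (g : Nat → Int) (w : Nat) (m : Nat) : List Int :=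
  ((List.range m).filter
    (fun rr => decide (2*w ≤ rr ∧ ∀ k ≤ rr, rr - 2*w ≤ k → g k ≤ g (rr - w)))).map
    (fun rr : Nat => (rr : Int) - (w : Int))

theorem pk_range_restrict (n a : Nat) (q : Nat → Bool) :
    (List.range n).filter (fun rr => decide (a ≤ rr) && q rr) =
      ((List.range (n - a)).map (a + ·)).filter q := by
  rcases Nat.le_total a n with h | h
  · conv_lhs => rw [show n = a + (n - a) by omega, List.range_add]
    rw [List.filter_append]
    rw [show (List.range a).filter (fun rr => decide (a ≤ rr) && q rr) = [] from by
      rw [List.filter_eq_nil_iff]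
      intro x hx
      simp only [List.mem_range] at hx
      simp only [Bool.and_eq_true, decide_eq_true_eq, not_and]
      intro hcon
      omega]
    rw [List.nil_append]
    apply List.filter_congr
    intro x hx
    rcases List.mem_map.mp hx with ⟨k, _, rfl⟩
    rw [show decide (a ≤ a + k) = true from by simp, Bool.true_and]
  · rw [show n - a = 0 by omega]
    simp only [List.range_zero, List.map_nil, List.filter_nil]
    rw [List.filter_eq_nil_iff]
    intro x hx
    simp only [List.mem_range] at hx
    simp only [Bool.and_eq_true, decide_eq_true_eq, not_and]
    intro hcon
    omega

-- the inner all-loop of A states exactly the window condition of pkOut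
theorem pk_pred_iff (f : List Int) (w : Nat) :
    ∀ k ∈ List.range (f.length - 2*w),
      ((fun i => (PySem.List.pyRange (i - (w:Int)) (i + (w:Int) + 1) 1).all fun j =>
          decide (PySem.List.pyGetD f j 0 ≤ PySem.List.pyGetD f i 0)) ∘ fun k : Nat => (w:Int) + (k:Int)) k =
      ((fun rr : Nat => decide (∀ k' ≤ rr, rr - 2*w ≤ k' → pkG f k' ≤ pkG f (rr - w))) ∘ fun x : Nat => 2*w + x) k := by
  intro k hk
  simp only [Function.comp, List.all_eq_true, decide_eq_true_eq]
  rw [Bool.eq_iff_iff]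
  simp only [List.all_eq_true, decide_eq_true_eq]
  constructor
  · intro h k' hk1 hk2
    have hj : ((k' : Int)) ∈ PySem.List.pyRange ((w:Int) + k - (w:Int)) ((w:Int) + k + (w:Int) + 1) 1 := by
      rw [PySem.List.mem_pyRange_one]
      constructor <;> [skip; skip] <;> push_cast <;> omega
    have := h _ hj
    rw [PySem.List.pyGetD_natCast] at this
    rw [show ((w:Int) + (k:Int)) = ((w + k : Nat) : Int) from by push_cast; ring,
        PySem.List.pyGetD_natCast] at this
    unfold pkG
    rw [show 2*w + k - w = w + k from by omega]
    exact this
  · intro h j hj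
    rw [PySem.List.mem_pyRange_one] at hj
    have hj0 : 0 ≤ j := by omega
    obtain ⟨j', rfl⟩ : ∃ j' : Nat, j = (j' : Int) := ⟨j.toNat, (Int.toNat_of_nonneg hj0).symm⟩
    have h1 : j' ≤ 2*w + k := by omega
    have h2 : 2*w + k - 2*w ≤ j' := by omega
    have := h j' h1 h2
    unfold pkG at this
    rw [PySem.List.pyGetD_natCast]
    rw [show ((w:Int) + (k:Int)) = ((w + k : Nat) : Int) from by push_cast; ring,
        PySem.List.pyGetD_natCast]
    rw [show 2*w + k - w = w + k from by omega] at this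
    exact this

theorem pk_A_spec (f : List Int) (w : Nat) :
    findpeaks_naive f (w : Int) = pkOut (pkG f) w f.length := by
  unfold findpeaks_naive
  show (PySem.List.pyRange (w : Int) (PySem.List.len f - (w : Int)) 1).foldl _ [] = _
  rw [PySem.List.foldl_append_if_eq_filter]
  rw [List.nil_append]
  rw [PySem.List.len_eq]
  rw [PySem.List.pyRange_one]
  rw [List.filter_map]
  unfold pkOut
  have hsplit : (fun rr : Nat => decide (2*w ≤ rr ∧ ∀ k ≤ rr, rr - 2*w ≤ k → pkG f k ≤ pkG f (rr - w)))
      = fun rr : Nat => decide (2*w ≤ rr) && decide (∀ k ≤ rr, rr - 2*w ≤ k → pkG f k ≤ pkG f (rr - w)) := by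
    funext rr
    rw [Bool.decide_and]
  rw [hsplit, pk_range_restrict, List.filter_map, List.map_map]
  rw [show (↑f.length - (w:Int) - (w:Int)).toNat = f.length - 2*w from by omega]
  rw [List.filter_congr (pk_pred_iff f w)]
  apply List.map_congr_left
  intro k hk
  simp only [Function.comp]
  push_cast
  ring

-- step function = the fold body of port B
def pkStep (f : List Int) (W : Int) (st : List Int × Nat × List Int) (r : Int) :
    List Int × Nat × List Int :=
  let dq := st.1
  let head := st.2.1
  let out := st.2.2
  let v := PySem.List.pyGetD f r 0
  let dq := bPop f v dq head
  let dq := dq ++ [r]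
  let i := r - W
  if W ≤ i then
    let head := bAdvance dq head (i - W)
    if PySem.List.pyGetD f (dq.getD head 0) 0 = PySem.List.pyGetD f i 0 then
      (dq, head, out ++ [i])
    else (dq, head, out)
  else (dq, head, out)

-- live part of the deque after step m-1 (window left bound m-1-2w at that moment)
def pkWc (g : Nat → Int) (w : Nat) : Nat → List Nat
  | 0 => []
  | m+1 => (pkCand g m).filter (fun j => decide (m - 2*w ≤ j))

theorem pkWc_dec (f : List Int) (w m : Nat) :
    (pkWc (pkG f) w m).Pairwise (fun a b => f.getD b 0 < f.getD a 0) := by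
  cases m with
  | zero => exact List.Pairwise.nil
  | succ m =>
    apply List.Pairwise.sublist List.filter_sublist
    apply List.Pairwise.imp_of_mem (l := pkCand (pkG f) m)
      (fun {a b} ha hb hab => pkCand_vals (pkG f) m ha hb hab)
    exact pkCand_sorted (pkG f) m

theorem pkWc_step (g : Nat → Int) (w m : Nat) :
    (pkWc g w m).filter (fun j => decide (g m < g j)) ++ [m] =
      (pkCand g m).filter (fun j => decide (m - 1 - 2*w ≤ j)) := by
  cases m with
  | zero =>
    have h0 : pkCand g 0 = [0] := by
      unfold pkCand
      rw [List.range_one]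
      rw [List.filter_eq_self.mpr]
      intro x hx
      simp only [List.mem_singleton] at hx
      subst hx
      simp only [decide_eq_true_eq]
      omega
    rw [h0]
    simp [pkWc]
  | succ m =>
    simp only [pkWc]
    rw [pkCand_rec g m, List.filter_append, List.filter_filter, List.filter_singleton]
    rw [show (decide (m + 1 - 1 - 2*w ≤ m + 1)) = true from by
      simp only [decide_eq_true_eq]; omega]
    simp only [Bool.cond_true]
    rw [List.filter_filter]
    congr 1
    apply List.filter_congr
    intro j hj
    rw [Bool.and_comm]
    have he : (m + 1 - 1 - 2*w) = m - 2*w := by omega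
    rw [he]

-- one emitted element of pkOut
theorem pkOut_succ (g : Nat → Int) (w m : Nat) :
    pkOut g w (m+1) = pkOut g w m ++
      (if 2*w ≤ m ∧ (∀ k ≤ m, m - 2*w ≤ k → g k ≤ g (m - w)) then [(m:Int) - (w:Int)] else []) := by
  unfold pkOut
  rw [List.range_succ, List.filter_append, List.map_append, List.filter_singleton]
  congr 1
  by_cases hc : 2*w ≤ m ∧ (∀ k ≤ m, m - 2*w ≤ k → g k ≤ g (m - w))
  · rw [if_pos hc, show (decide (2*w ≤ m ∧ ∀ k ≤ m, m - 2*w ≤ k → g k ≤ g (m - w))) = true from by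
      simpa using hc]
    rfl
  · rw [if_neg hc, show (decide (2*w ≤ m ∧ ∀ k ≤ m, m - 2*w ≤ k → g k ≤ g (m - w))) = false from by
      simpa using hc]
    rfl

-- the emit test at the deque front decides exactly the window condition
theorem pk_emit_iff (g : Nat → Int) (w m : Nat) (h2w : 2*w ≤ m) (c : Nat) (rest : List Nat)
    (hc : pkWc g w (m+1) = c :: rest) :
    g c = g (m - w) ↔ (∀ k ≤ m, m - 2*w ≤ k → g k ≤ g (m - w)) := by
  have hmax := pk_head_max g m (m - 2*w) (by omega) c rest hc
  obtain ⟨hclo, hcr, hcmax⟩ := hmax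
  constructor
  · intro he k hk1 hk2
    exact he ▸ hcmax k hk2 hk1
  · intro hall
    have h1 : g c ≤ g (m - w) := hall c hcr hclo
    have h2 : g (m - w) ≤ g c := hcmax (m - w) (by omega) (by omega)
    omega

theorem pk_inv (f : List Int) (w : Nat) (m : Nat) :
    ∃ pre : List Nat,
      ((List.range m).map (Nat.cast : Nat → Int)).foldl (pkStep f (w:Int)) ([], 0, []) =
        ((pre ++ pkWc (pkG f) w m).map (Nat.cast : Nat → Int), pre.length, pkOut (pkG f) w m) := by
  induction m with
  | zero => exact ⟨[], by simp [pkWc, pkOut]⟩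
  | succ m ih =>
    obtain ⟨pre, hpre⟩ := ih
    rw [List.range_succ, List.map_append, List.foldl_append, hpre, List.map_cons,
        List.map_nil, List.foldl_cons, List.foldl_nil]
    simp only [pkStep]
    rw [PySem.List.pyGetD_natCast]
    rw [show f.getD m 0 = pkG f m from rfl]
    rw [show bPop f (pkG f m) ((pre ++ pkWc (pkG f) w m).map (Nat.cast : Nat → Int)) pre.length
          = (pre ++ (pkWc (pkG f) w m).filter (fun j => decide (pkG f m < pkG f j))).map
              (Nat.cast : Nat → Int) from bPop_spec f (pkG f m) pre (pkWc (pkG f) w m) (pkWc_dec f w m)]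
    rw [show (pre ++ (pkWc (pkG f) w m).filter (fun j => decide (pkG f m < pkG f j))).map
            (Nat.cast : Nat → Int) ++ [((m : Nat) : Int)]
          = (pre ++ ((pkWc (pkG f) w m).filter (fun j => decide (pkG f m < pkG f j)) ++ [m])).map
              (Nat.cast : Nat → Int) from by simp]
    rw [pkWc_step (pkG f) w m]
    by_cases h2w : 2*w ≤ m
    · rw [if_pos (show (w:Int) ≤ (m:Int) - (w:Int) from by omega)]
      rw [bAdvance_spec pre ((pkCand (pkG f) m).filter (fun j => decide (m - 1 - 2*w ≤ j)))
            ((m:Int) - (w:Int) - (w:Int))]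
      set T := (pkCand (pkG f) m).filter (fun j => decide (m - 1 - 2*w ≤ j)) with hT
      set q := (fun j : Nat => decide ((j:Int) < (m:Int) - (w:Int) - (w:Int))) with hq
      have hTsorted : T.Pairwise (· < ·) :=
        List.Pairwise.sublist List.filter_sublist (pkCand_sorted (pkG f) m)
      have hdrop : T.dropWhile q = pkWc (pkG f) w (m+1) := by
        rw [hq, sorted_dropWhile_filter T ((m:Int) - (w:Int) - (w:Int)) hTsorted]
        rw [hT, List.filter_filter]
        simp only [pkWc]
        apply List.filter_congr
        intro j hj
        rw [Bool.eq_iff_iff]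
        simp only [Bool.and_eq_true, decide_eq_true_eq]
        omega
      have hsplit : pre ++ T = (pre ++ T.takeWhile q) ++ T.dropWhile q := by
        rw [List.append_assoc, List.takeWhile_append_dropWhile]
      have hmem : m ∈ pkWc (pkG f) w (m+1) := by
        simp only [pkWc]
        rw [List.mem_filter]
        exact ⟨pkCand_self _ _, by simp only [decide_eq_true_eq]; omega⟩
      obtain ⟨c, rest, hcr⟩ : ∃ c rest, pkWc (pkG f) w (m+1) = c :: rest := by
        cases h : pkWc (pkG f) w (m+1) with
        | nil => rw [h] at hmem; cases hmem
        | cons c rest => exact ⟨c, rest, rfl⟩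
      refine ⟨pre ++ T.takeWhile q, ?_⟩
      rw [hsplit, hdrop, hcr]
      have hget : (((pre ++ T.takeWhile q) ++ (c :: rest)).map (Nat.cast : Nat → Int)).getD
          (pre.length + (T.takeWhile q).length) 0 = (c : Int) := by
        rw [List.map_append, List.getD_eq_getElem?_getD,
            List.getElem?_append_right (by simp)]
        simp
      rw [hget, PySem.List.pyGetD_natCast]
      rw [show ((m:Int) - (w:Int)) = (((m - w : Nat)) : Int) from by omega,
          PySem.List.pyGetD_natCast]
      rw [show f.getD c 0 = pkG f c from rfl, show f.getD (m - w) 0 = pkG f (m - w) from rfl]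
      have hiff := pk_emit_iff (pkG f) w m h2w c rest hcr
      by_cases hemit : pkG f c = pkG f (m - w)
      · rw [if_pos hemit]
        rw [show pkOut (pkG f) w (m+1) = pkOut (pkG f) w m ++ [(m:Int) - (w:Int)] from by
          rw [pkOut_succ]
          rw [if_pos ⟨h2w, hiff.mp hemit⟩]]
        rw [show ((m:Int) - (w:Int)) = (((m - w : Nat)) : Int) from by omega]
        simp
      · rw [if_neg hemit]
        rw [show pkOut (pkG f) w (m+1) = pkOut (pkG f) w m from by
          rw [pkOut_succ]
          rw [if_neg (fun hcon => hemit (hiff.mpr hcon.2))]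
          simp]
        simp
    · rw [if_neg (show ¬ ((w:Int) ≤ (m:Int) - (w:Int)) from by omega)]
      refine ⟨pre, ?_⟩
      rw [show (pkCand (pkG f) m).filter (fun j => decide (m - 1 - 2*w ≤ j))
            = pkWc (pkG f) w (m+1) from by
        simp only [pkWc]
        apply List.filter_congr
        intro j hj
        rw [Bool.eq_iff_iff]
        simp only [decide_eq_true_eq]
        omega]
      rw [show pkOut (pkG f) w (m+1) = pkOut (pkG f) w m from by
        rw [pkOut_succ]
        rw [if_neg (fun hcon => h2w hcon.1)]
        simp]

theorem pk_alt_eq (f : List Int) (W : Int) :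
    findpeaks_naive_alt f W =
      ((PySem.List.pyRange 0 (PySem.List.len f) 1).foldl (pkStep f W) ([], 0, [])).2.2 := rfl

theorem pk_B_spec (f : List Int) (w : Nat) :
    findpeaks_naive_alt f (w : Int) = pkOut (pkG f) w f.length := by
  rw [pk_alt_eq, PySem.List.len_eq, PySem.List.pyRange_zero_natCast]
  obtain ⟨pre, h⟩ := pk_inv f w f.length
  rw [h]

-- ===== VERDICT (by name: the statement is the Claim_ definition above) =====
theorem findpeaks_naive_spec : Claim_equal_findpeaks_naive := by
  intro f W _ hpre
  obtain ⟨w, rfl⟩ : ∃ w : Nat, W = (w : Int) :=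
    ⟨W.toNat, by unfold Pre_findpeaks_naive at hpre; omega⟩
  unfold Spec_findpeaks_naive
  rw [pk_A_spec, pk_B_spec]
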